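-- pv_equiv track=rewrite | github.com/DevIsuruSampath/FileStreamBot | FileStream/utils/adsterra_api.py | _placement_format
-- ===== SOURCE A (Python) =====
-- from typing import Any
--
-- def _placement_format(item: dict[str, Any]) -> str:
--     text = f"{item.get('title', '')} {item.get('alias', '')}".lower()
--
--     if any(k in text for k in ("popunder", "pop-under", "pop under")):
--         return "popunder"
--     if any(k in text for k in ("socialbar", "social bar")):
--         return "social_bar"
--     if "native" in text:
--         return "native_banner"
--     if "banner" in text:
--         return "banner"
--
--     return "generic"
-- ===== SOURCE B (Python) =====
-- from typing import Any
--
-- # Single left-to-right scan over text positions: at each position, try to match the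
-- # keywords that start there and keep the best (highest) priority seen; the final
-- # priority indexes the label table.  Position-major traversal instead of A's
-- # keyword-major chain of substring tests.
-- _KW = (
--     ("popunder", 4), ("pop-under", 4), ("pop under", 4),
--     ("socialbar", 3), ("social bar", 3),
--     ("native", 2), ("banner", 1),
-- )
-- _LABELS = ("generic", "banner", "native_banner", "social_bar", "popunder")
--
-- def _placement_format(item: dict[str, Any]) -> str:
--     text = f"{item.get('title', '')} {item.get('alias', '')}".lower()
--     best = 0
--     for i in range(len(text)):
--         for k, p in _KW:
--             if p > best and text.startswith(k, i):
--                 best = p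
--     return _LABELS[best]
-- ===== Notes on version B (the rewrite author's own statement) =====
-- stated objective: alternative
-- what changed: Replaces A's keyword-major chain of early-return substring-membership tests with a single position-major scan of the text that tries to match each keyword starting at every index, keeps the best priority seen in an accumulator, and indexes a label table with the final priority.
import Mathlib
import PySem

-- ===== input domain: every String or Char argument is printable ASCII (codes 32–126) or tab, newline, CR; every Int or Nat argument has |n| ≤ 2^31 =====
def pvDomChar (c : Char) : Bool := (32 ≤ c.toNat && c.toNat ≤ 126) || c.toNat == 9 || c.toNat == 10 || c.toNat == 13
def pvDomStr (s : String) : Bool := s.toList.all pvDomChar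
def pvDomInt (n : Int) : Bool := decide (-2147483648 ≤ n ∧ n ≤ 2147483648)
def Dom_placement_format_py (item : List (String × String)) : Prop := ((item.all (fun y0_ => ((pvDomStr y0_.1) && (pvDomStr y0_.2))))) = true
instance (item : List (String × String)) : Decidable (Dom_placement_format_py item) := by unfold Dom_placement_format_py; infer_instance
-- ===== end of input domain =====

-- B replaces A's keyword-major chain of early-return substring tests by a single
-- position-major scan of the text keeping the best matched keyword priority
-- (alternative decomposition; same cost).

-- ===== PORT A =====
def placement_format_py (item : List (String × String)) : String :=
  let d : PySem.Dict String String := PySem.Dict.mk item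
  let text := PySem.Str.lower ((d.getD "title" "") ++ " " ++ (d.getD "alias" ""))
  if (["popunder", "pop-under", "pop under"].any (fun k => PySem.Str.isIn k text)) then "popunder"
  else if (["socialbar", "social bar"].any (fun k => PySem.Str.isIn k text)) then "social_bar"
  else if PySem.Str.isIn "native" text then "native_banner"
  else if PySem.Str.isIn "banner" text then "banner"
  else "generic"

-- ===== PORT B =====
-- keyword → priority table (priority 0 = no match = "generic") and the label table
def pfKW : List (List Char × Nat) :=
  [("popunder".toList, 4), ("pop-under".toList, 4), ("pop under".toList, 4),
   ("socialbar".toList, 3), ("social bar".toList, 3),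
   ("native".toList, 2), ("banner".toList, 1)]

def pfLabels : List String := ["generic", "banner", "native_banner", "social_bar", "popunder"]

def pfScan (t : List Char) : Nat :=
  (List.range t.length).foldl
    (fun best i =>
      pfKW.foldl
        (fun b kp => if kp.2 > b && PySem.Chars.startswith (t.drop i) kp.1 then kp.2 else b)
        best)
    0


def placement_format_py_alt (item : List (String × String)) : String :=
  let d : PySem.Dict String String := PySem.Dict.mk item
  let text := PySem.Str.lower ((d.getD "title" "") ++ " " ++ (d.getD "alias" ""))
  pfLabels.getD (pfScan text.toList) "generic"

-- ===== PRECONDITION & SPEC =====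
def Spec_placement_format_py (item : List (String × String)) (out : String) : Prop := out = placement_format_py_alt item
instance (item : List (String × String)) (out : String) : Decidable (Spec_placement_format_py item out) := by unfold Spec_placement_format_py; infer_instance

-- ===== CLAIM (what is proved, stated in full; the proofs are below) =====
def Claim_equal_placement_format_py : Prop := ∀ (item : List (String × String)), Dom_placement_format_py item → Spec_placement_format_py item (placement_format_py item)

-- ===== LEMMAS AND PROOFS =====
-- proof-side helpers
def pfMaxF {α : Type} (f : α → Nat) (l : List α) : Nat := l.foldl (fun b x => max b (f x)) 0

def pfG (t : List Char) (j : Nat) (kp : List Char × Nat) : Nat :=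
  if PySem.Chars.startswith (t.drop j) kp.1 then kp.2 else 0

theorem pfMaxF_pull {α : Type} (f : α → Nat) (l : List α) (b : Nat) :
    l.foldl (fun b x => max b (f x)) b = max b (pfMaxF f l) := by
  induction l generalizing b with
  | nil => simp [pfMaxF]
  | cons a l ih =>
    simp only [pfMaxF, List.foldl_cons, ih (max b (f a)), ih (max 0 (f a))]
    omega

theorem pfMaxF_le {α : Type} (f : α → Nat) (l : List α) (c : Nat) :
    pfMaxF f l ≤ c ↔ ∀ x ∈ l, f x ≤ c := by
  induction l with
  | nil => simp [pfMaxF]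
  | cons a l ih =>
    rw [pfMaxF, List.foldl_cons, pfMaxF_pull]
    simp only [List.mem_cons, forall_eq_or_imp, ← ih]
    omega

theorem pfMaxF_ge {α : Type} (f : α → Nat) {l : List α} {x : α} (hx : x ∈ l) :
    f x ≤ pfMaxF f l := by
  induction l with
  | nil => cases hx
  | cons a l ih =>
    rw [pfMaxF, List.foldl_cons, pfMaxF_pull]
    rcases List.mem_cons.mp hx with h | h
    · subst h; omega
    · have := ih h; omega

theorem pfScan_eq (t : List Char) :
    pfScan t = pfMaxF (fun j => pfMaxF (pfG t j) pfKW) (List.range t.length) := by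
  unfold pfScan pfMaxF
  have hstep : (fun (best : Nat) (i : Nat) =>
      pfKW.foldl (fun b kp => if kp.2 > b && PySem.Chars.startswith (t.drop i) kp.1 then kp.2 else b) best)
      = (fun (best : Nat) (i : Nat) => max best (pfMaxF (pfG t i) pfKW)) := by
    funext best i
    have hin : (fun (b : Nat) (kp : List Char × Nat) => if kp.2 > b && PySem.Chars.startswith (t.drop i) kp.1 then kp.2 else b)
        = (fun (b : Nat) (kp : List Char × Nat) => max b (pfG t i kp)) := by
      funext b kp
      unfold pfG
      cases h : PySem.Chars.startswith (t.drop i) kp.1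
      · simp
      · simp
        split <;> omega
    rw [hin]
    exact pfMaxF_pull (pfG t i) pfKW best
  rw [hstep]
  rfl

theorem pf_isIn_of_startswith {t k : List Char} (i : Nat)
    (h : PySem.Chars.startswith (t.drop i) k = true) : PySem.Chars.isIn k t = true :=
  (PySem.Chars.exists_prefix_drop_iff_isIn k t).mp ⟨i, (PySem.Chars.startswith_iff _ _).mp h⟩

theorem pf_exists_idx_of_isIn {t k : List Char} (hk : k ≠ [])
    (h : PySem.Chars.isIn k t = true) :
    ∃ i < t.length, PySem.Chars.startswith (t.drop i) k = true := by
  obtain ⟨j, hj⟩ := (PySem.Chars.exists_prefix_drop_iff_isIn k t).mpr h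
  by_cases hjl : j < t.length
  · exact ⟨j, hjl, (PySem.Chars.startswith_iff _ _).mpr hj⟩
  · exfalso
    rw [List.drop_eq_nil_of_le (by omega)] at hj
    exact hk (List.prefix_nil.mp hj)

theorem pfScan_ge {t k : List Char} {p : Nat} (hmem : (k, p) ∈ pfKW) (hk : k ≠ [])
    (h : PySem.Chars.isIn k t = true) : p ≤ pfScan t := by
  rw [pfScan_eq]
  obtain ⟨i, hi, hs⟩ := pf_exists_idx_of_isIn hk h
  have h1 : p ≤ pfMaxF (pfG t i) pfKW := by
    have h2 : pfG t i (k, p) ≤ pfMaxF (pfG t i) pfKW := pfMaxF_ge (pfG t i) hmem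
    unfold pfG at h2
    rwa [if_pos hs] at h2
  exact le_trans h1 (pfMaxF_ge (fun j => pfMaxF (pfG t j) pfKW) (List.mem_range.mpr hi))

theorem pfScan_le {t : List Char} {c : Nat}
    (h : ∀ kp ∈ pfKW, c < kp.2 → PySem.Chars.isIn kp.1 t = false) : pfScan t ≤ c := by
  rw [pfScan_eq, pfMaxF_le]
  intro i _
  rw [pfMaxF_le]
  intro kp hkp
  unfold pfG
  by_cases hs : PySem.Chars.startswith (t.drop i) kp.1 = true
  · rw [if_pos hs]
    by_contra hgt
    have hfalse := h kp hkp (by omega)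
    rw [pf_isIn_of_startswith i hs] at hfalse
    cases hfalse
  · have hs' : PySem.Chars.startswith (t.drop i) kp.1 = false := by simpa using hs
    rw [hs']
    simp

theorem pfScan_le4 (t : List Char) : pfScan t ≤ 4 := by
  apply pfScan_le
  intro kp hkp hgt
  exfalso
  simp [pfKW] at hkp
  rcases hkp with h|h|h|h|h|h|h <;> subst h <;> simp at hgt

theorem pf_eq4 {t : List Char}
    (h : PySem.Chars.isIn "popunder".toList t = true ∨ PySem.Chars.isIn "pop-under".toList t = true ∨
         PySem.Chars.isIn "pop under".toList t = true) : pfScan t = 4 := by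
  rcases h with h|h|h
  · exact le_antisymm (pfScan_le4 t) (pfScan_ge (k := "popunder".toList) (p := 4) (by simp [pfKW]) (by decide) h)
  · exact le_antisymm (pfScan_le4 t) (pfScan_ge (k := "pop-under".toList) (p := 4) (by simp [pfKW]) (by decide) h)
  · exact le_antisymm (pfScan_le4 t) (pfScan_ge (k := "pop under".toList) (p := 4) (by simp [pfKW]) (by decide) h)

theorem pf_eq3 {t : List Char}
    (f1 : PySem.Chars.isIn "popunder".toList t = false) (f2 : PySem.Chars.isIn "pop-under".toList t = false)
    (f3 : PySem.Chars.isIn "pop under".toList t = false)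
    (h : PySem.Chars.isIn "socialbar".toList t = true ∨ PySem.Chars.isIn "social bar".toList t = true) :
    pfScan t = 3 := by
  apply le_antisymm
  · apply pfScan_le
    intro kp hkp hgt
    fin_cases hkp
    · exact f1
    · exact f2
    · exact f3
    all_goals exact absurd hgt (by decide)
  · rcases h with h|h
    · exact pfScan_ge (k := "socialbar".toList) (p := 3) (by simp [pfKW]) (by decide) h
    · exact pfScan_ge (k := "social bar".toList) (p := 3) (by simp [pfKW]) (by decide) h

theorem pf_eq2 {t : List Char}
    (f1 : PySem.Chars.isIn "popunder".toList t = false) (f2 : PySem.Chars.isIn "pop-under".toList t = false)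
    (f3 : PySem.Chars.isIn "pop under".toList t = false) (f4 : PySem.Chars.isIn "socialbar".toList t = false)
    (f5 : PySem.Chars.isIn "social bar".toList t = false)
    (h : PySem.Chars.isIn "native".toList t = true) : pfScan t = 2 := by
  apply le_antisymm
  · apply pfScan_le
    intro kp hkp hgt
    fin_cases hkp
    · exact f1
    · exact f2
    · exact f3
    · exact f4
    · exact f5
    all_goals exact absurd hgt (by decide)
  · exact pfScan_ge (k := "native".toList) (p := 2) (by simp [pfKW]) (by decide) h

theorem pf_eq1 {t : List Char}
    (f1 : PySem.Chars.isIn "popunder".toList t = false) (f2 : PySem.Chars.isIn "pop-under".toList t = false)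
    (f3 : PySem.Chars.isIn "pop under".toList t = false) (f4 : PySem.Chars.isIn "socialbar".toList t = false)
    (f5 : PySem.Chars.isIn "social bar".toList t = false) (f6 : PySem.Chars.isIn "native".toList t = false)
    (h : PySem.Chars.isIn "banner".toList t = true) : pfScan t = 1 := by
  apply le_antisymm
  · apply pfScan_le
    intro kp hkp hgt
    fin_cases hkp
    · exact f1
    · exact f2
    · exact f3
    · exact f4
    · exact f5
    · exact f6
    · exact absurd hgt (by decide)
  · exact pfScan_ge (k := "banner".toList) (p := 1) (by simp [pfKW]) (by decide) h

theorem pf_eq0 {t : List Char}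
    (f1 : PySem.Chars.isIn "popunder".toList t = false) (f2 : PySem.Chars.isIn "pop-under".toList t = false)
    (f3 : PySem.Chars.isIn "pop under".toList t = false) (f4 : PySem.Chars.isIn "socialbar".toList t = false)
    (f5 : PySem.Chars.isIn "social bar".toList t = false) (f6 : PySem.Chars.isIn "native".toList t = false)
    (f7 : PySem.Chars.isIn "banner".toList t = false) : pfScan t = 0 := by
  have := pfScan_le (t := t) (c := 0) ?_
  · omega
  · intro kp hkp hgt
    fin_cases hkp
    · exact f1
    · exact f2
    · exact f3
    · exact f4
    · exact f5
    · exact f6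
    · exact f7

theorem pf_key (text : String) :
    pfLabels.getD (pfScan text.toList) "generic" =
    (if (["popunder", "pop-under", "pop under"].any (fun k => PySem.Str.isIn k text)) then "popunder"
     else if (["socialbar", "social bar"].any (fun k => PySem.Str.isIn k text)) then "social_bar"
     else if PySem.Str.isIn "native" text then "native_banner"
     else if PySem.Str.isIn "banner" text then "banner"
     else "generic") := by
  by_cases hA : (["popunder", "pop-under", "pop under"].any (fun k => PySem.Str.isIn k text)) = true
  · rw [if_pos hA]
    simp only [List.any_cons, List.any_nil, Bool.or_eq_true, Bool.or_false, PySem.Str.isIn_eq] at hA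
    rw [pf_eq4 hA]
    rfl
  · rw [if_neg hA]
    simp only [List.any_cons, List.any_nil, Bool.or_eq_true, Bool.or_false, PySem.Str.isIn_eq,
      not_or, Bool.not_eq_true] at hA
    obtain ⟨f1, f2, f3⟩ := hA
    by_cases hB : (["socialbar", "social bar"].any (fun k => PySem.Str.isIn k text)) = true
    · rw [if_pos hB]
      simp only [List.any_cons, List.any_nil, Bool.or_eq_true, Bool.or_false, PySem.Str.isIn_eq] at hB
      rw [pf_eq3 f1 f2 f3 hB]
      rfl
    · rw [if_neg hB]
      simp only [List.any_cons, List.any_nil, Bool.or_eq_true, Bool.or_false, PySem.Str.isIn_eq,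
        not_or, Bool.not_eq_true] at hB
      obtain ⟨f4, f5⟩ := hB
      by_cases hN : PySem.Str.isIn "native" text = true
      · rw [if_pos hN]
        rw [PySem.Str.isIn_eq] at hN
        rw [pf_eq2 f1 f2 f3 f4 f5 hN]
        rfl
      · rw [if_neg hN]
        rw [PySem.Str.isIn_eq, Bool.not_eq_true] at hN
        by_cases hBa : PySem.Str.isIn "banner" text = true
        · rw [if_pos hBa]
          rw [PySem.Str.isIn_eq] at hBa
          rw [pf_eq1 f1 f2 f3 f4 f5 hN hBa]
          rfl
        · rw [if_neg hBa]
          rw [PySem.Str.isIn_eq, Bool.not_eq_true] at hBa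
          rw [pf_eq0 f1 f2 f3 f4 f5 hN hBa]
          rfl

-- ===== VERDICT (by name: the statement is the Claim_ definition above) =====
theorem placement_format_py_spec : Claim_equal_placement_format_py := by
  intro item _
  unfold Spec_placement_format_py placement_format_py placement_format_py_alt
  exact (pf_key _).symm
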